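-- pv_equiv track=rewrite | github.com/reyn1920/monkey-paw-production-v4 | scripts/build_comparison.py | infer_actual_status
-- ===== SOURCE A (Python) =====
-- def infer_actual_status(routes, jobs, dbj):
--     # Lightweight heuristics
--     has_health = any((r.get("path")=="/api/health") for r in routes.get("routes",[])) if "routes" in routes else False
--     ep = {r.get("path",""): r for r in routes.get("routes",[])}
--     def _yn(flag): return "Working (detected)" if flag else "Missing/unclear"
--     research = any("/api/research" in k for k in ep)
--     drafting = any("/api/draft" in k for k in ep)
--     repurpose = any("/api/repurpose" in k for k in ep)
--     publish = any("/api/publish" in k for k in ep)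
--     orches = bool(jobs.get("job_files"))
--     return {
--         "mission": "Observable API with health." if has_health else "Unclear; no health route detected.",
--         "research": _yn(research),
--         "drafting": _yn(drafting),
--         "repurposing": _yn(repurpose),
--         "publishing": _yn(publish),
--         "orchestration": _yn(orches)
--     }
-- ===== SOURCE B (Python) =====
-- def infer_actual_status(routes, jobs, dbj):
--     # Single pass over the route list; no intermediate endpoint dict.
--     has_health = research = drafting = repurpose = publish = False
--     for r in routes.get("routes", []):
--         p = r.get("path", "")
--         has_health = has_health or p == "/api/health"
--         research = research or "/api/research" in p
--         drafting = drafting or "/api/draft" in p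
--         repurpose = repurpose or "/api/repurpose" in p
--         publish = publish or "/api/publish" in p
--     orches = bool(jobs.get("job_files"))
--     def _yn(flag): return "Working (detected)" if flag else "Missing/unclear"
--     return {
--         "mission": "Observable API with health." if has_health else "Unclear; no health route detected.",
--         "research": _yn(research),
--         "drafting": _yn(drafting),
--         "repurposing": _yn(repurpose),
--         "publishing": _yn(publish),
--         "orchestration": _yn(orches),
--     }
-- ===== Notes on version B (the rewrite author's own statement) =====
-- stated objective: simpler
-- what changed: B replaces A's five separate scans plus an intermediate path-keyed endpoint dict with one single loop over the route list that sets all five flags directly.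
import Mathlib
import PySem

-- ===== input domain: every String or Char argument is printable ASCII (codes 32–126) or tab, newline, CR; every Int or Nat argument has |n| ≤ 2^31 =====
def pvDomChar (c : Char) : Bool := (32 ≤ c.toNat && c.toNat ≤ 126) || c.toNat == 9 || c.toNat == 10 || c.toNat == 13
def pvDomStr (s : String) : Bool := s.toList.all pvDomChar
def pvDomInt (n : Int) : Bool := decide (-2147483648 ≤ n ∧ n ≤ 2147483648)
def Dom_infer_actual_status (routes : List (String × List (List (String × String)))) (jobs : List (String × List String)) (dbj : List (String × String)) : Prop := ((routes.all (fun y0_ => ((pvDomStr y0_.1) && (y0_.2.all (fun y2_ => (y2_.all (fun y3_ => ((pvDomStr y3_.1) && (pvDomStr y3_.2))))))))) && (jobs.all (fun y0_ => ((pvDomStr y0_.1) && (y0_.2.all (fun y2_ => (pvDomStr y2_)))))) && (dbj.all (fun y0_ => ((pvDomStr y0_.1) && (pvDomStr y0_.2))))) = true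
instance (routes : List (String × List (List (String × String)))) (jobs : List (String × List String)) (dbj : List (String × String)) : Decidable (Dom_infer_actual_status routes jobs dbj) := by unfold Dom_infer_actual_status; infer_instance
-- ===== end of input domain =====

-- ===== PORT A =====
-- B replaces A's several scans and intermediate endpoint dict with one single pass; return value only, no mutation.
def infer_actual_status (routes : List (String × List (List (String × String)))) (jobs : List (String × List String)) (dbj : List (String × String)) : List (String × String) :=
  let rlist := (PySem.Dict.mk routes).getD "routes" []
  let has_health :=
    if (PySem.Dict.mk routes).contains "routes" then
      rlist.any (fun r => (PySem.Dict.mk r).get? "path" == some "/api/health")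
    else false
  let ep := rlist.foldl (fun d r => d.insert ((PySem.Dict.mk r).getD "path" "") r) PySem.Dict.empty
  let yn := fun (flag : Bool) => if flag then "Working (detected)" else "Missing/unclear"
  let research := ep.keys.any (fun k => PySem.Str.isIn "/api/research" k)
  let drafting := ep.keys.any (fun k => PySem.Str.isIn "/api/draft" k)
  let repurpose := ep.keys.any (fun k => PySem.Str.isIn "/api/repurpose" k)
  let publish := ep.keys.any (fun k => PySem.Str.isIn "/api/publish" k)
  let orches := match (PySem.Dict.mk jobs).get? "job_files" with
    | some l => !l.isEmpty
    | none => false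
  [("mission", if has_health then "Observable API with health." else "Unclear; no health route detected."),
   ("research", yn research),
   ("drafting", yn drafting),
   ("repurposing", yn repurpose),
   ("publishing", yn publish),
   ("orchestration", yn orches)]

-- ===== PORT B =====
def infer_actual_status_alt (routes : List (String × List (List (String × String)))) (jobs : List (String × List String)) (dbj : List (String × String)) : List (String × String) :=
  let st := ((PySem.Dict.mk routes).getD "routes" []).foldl
    (fun (s : Bool × Bool × Bool × Bool × Bool) r =>
      let p := (PySem.Dict.mk r).getD "path" ""
      (s.1 || p == "/api/health",
       s.2.1 || PySem.Str.isIn "/api/research" p,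
       s.2.2.1 || PySem.Str.isIn "/api/draft" p,
       s.2.2.2.1 || PySem.Str.isIn "/api/repurpose" p,
       s.2.2.2.2 || PySem.Str.isIn "/api/publish" p))
    (false, false, false, false, false)
  let orches := match (PySem.Dict.mk jobs).get? "job_files" with
    | some l => !l.isEmpty
    | none => false
  let yn := fun (flag : Bool) => if flag then "Working (detected)" else "Missing/unclear"
  [("mission", if st.1 then "Observable API with health." else "Unclear; no health route detected."),
   ("research", yn st.2.1),
   ("drafting", yn st.2.2.1),
   ("repurposing", yn st.2.2.2.1),
   ("publishing", yn st.2.2.2.2),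
   ("orchestration", yn orches)]

-- ===== PRECONDITION & SPEC =====
def Spec_infer_actual_status (routes : List (String × List (List (String × String)))) (jobs : List (String × List String)) (dbj : List (String × String)) (out : List (String × String)) : Prop := out = infer_actual_status_alt routes jobs dbj
instance (routes : List (String × List (List (String × String)))) (jobs : List (String × List String)) (dbj : List (String × String)) (out : List (String × String)) : Decidable (Spec_infer_actual_status routes jobs dbj out) := by unfold Spec_infer_actual_status; infer_instance

-- ===== CLAIM (what is proved, stated in full; the proofs are below) =====
def Claim_equal_infer_actual_status : Prop := ∀ (routes : List (String × List (List (String × String)))) (jobs : List (String × List String)) (dbj : List (String × String)), Dom_infer_actual_status routes jobs dbj → Spec_infer_actual_status routes jobs dbj (infer_actual_status routes jobs dbj)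

-- ===== LEMMAS AND PROOFS =====

-- B's five-flag fold, component by component, equals five separate `any` scans over the list.
theorem alt_fold_eq (l : List (List (String × String))) (a b c d e : Bool) :
    l.foldl (fun (s : Bool × Bool × Bool × Bool × Bool) r =>
      let p := (PySem.Dict.mk r).getD "path" ""
      (s.1 || p == "/api/health",
       s.2.1 || PySem.Str.isIn "/api/research" p,
       s.2.2.1 || PySem.Str.isIn "/api/draft" p,
       s.2.2.2.1 || PySem.Str.isIn "/api/repurpose" p,
       s.2.2.2.2 || PySem.Str.isIn "/api/publish" p)) (a, b, c, d, e)
    = (a || l.any (fun r => (PySem.Dict.mk r).getD "path" "" == "/api/health"),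
       b || l.any (fun r => PySem.Str.isIn "/api/research" ((PySem.Dict.mk r).getD "path" "")),
       c || l.any (fun r => PySem.Str.isIn "/api/draft" ((PySem.Dict.mk r).getD "path" "")),
       d || l.any (fun r => PySem.Str.isIn "/api/repurpose" ((PySem.Dict.mk r).getD "path" "")),
       e || l.any (fun r => PySem.Str.isIn "/api/publish" ((PySem.Dict.mk r).getD "path" ""))) := by
  induction l generalizing a b c d e with
  | nil => simp
  | cons r t ih =>
    simp only [List.foldl_cons, List.any_cons]
    rw [ih]
    simp [Bool.or_assoc]

-- `any` over the deduplicated key set equals `any` over the underlying list.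
theorem any_ofList (l : List String) (f : String → Bool) :
    (PySem.Set.ofList l).any f = l.any f := by
  rw [Bool.eq_iff_iff]
  simp [List.any_eq_true, PySem.Set.mem_ofList]

-- keys of A's endpoint dict as a deduplicated list of paths
theorem ep_keys (l : List (List (String × String))) :
    (l.foldl (fun d r => d.insert ((PySem.Dict.mk r).getD "path" "") r) PySem.Dict.empty).keys
      = PySem.Set.ofList (l.map (fun r => (PySem.Dict.mk r).getD "path" "")) := by
  rw [PySem.Dict.keys_foldl_insert_key]
  simp [PySem.Set.update_nil_left]

-- A's Option-equality health test coincides with B's defaulted-string test on each route.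
theorem health_test (r : List (String × String)) :
    ((PySem.Dict.mk r).get? "path" == some "/api/health")
      = ((PySem.Dict.mk r).getD "path" "" == "/api/health") := by
  rcases h : (PySem.Dict.mk r).get? "path" with _ | v
  · rw [PySem.Dict.getD_of_get?_eq_none _ _ h]
    simp
  · rw [PySem.Dict.getD_of_get?_eq_some _ _ h]
    simp

-- ===== VERDICT (by name: the statement is the Claim_ definition above) =====
theorem infer_actual_status_spec : Claim_equal_infer_actual_status := by
  intro routes jobs dbj _
  unfold Spec_infer_actual_status infer_actual_status infer_actual_status_alt
  simp only [alt_fold_eq, ep_keys, Bool.false_or]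
  by_cases h : (PySem.Dict.mk routes).contains "routes" = true
  · simp only [h, if_true, any_ofList, List.any_map, Function.comp_def, health_test]
  · rw [Bool.not_eq_true] at h
    simp only [PySem.Dict.getD_of_not_contains _ _ h, h, Bool.false_eq_true,
      List.any_nil, List.map_nil, any_ofList, if_false]
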